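-- pv_equiv track=rewrite | github.com/AgenChou/coursework | NLP/exercise2/submission/classifier.py | count
-- ===== SOURCE A (Python) =====
-- def count(list):
--     ## the indexes is based on our tokenization
--     ## ['sentiment',[tokens for target tweet]]
--     a=len(list)
--     count={}
--
--     # Iterate over the each token in each phrase in the list. Add to the dictionary of sentiment counters.
--
--     for i in range(0,a):
--         b = len(list[i][1])
--         if list[i][0]=='positive':
--             for j in range(0,b):
--                 if list[i][1][j] not in count:
--                     count[list[i][1][j]]=[1,0,0]
--                 else:
--                     count[list[i][1][j]][0] = count[list[i][1][j]][0]+1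
--         if list[i][0]=='neutral':
--             for j in range(0,b):
--                 if list[i][1][j] not in count:
--                     count[list[i][1][j]]=[0,1,0]
--                 else:
--                     count[list[i][1][j]][1] = count[list[i][1][j]][1]+1
--         if list[i][0]=='negative':
--             for j in range(0,b):
--                 if list[i][1][j] not in count:
--                     count[list[i][1][j]]=[0,0,1]
--                 else:
--                     count[list[i][1][j]][2] = count[list[i][1][j]][2]+1
--     return count
-- ===== SOURCE B (Python) =====
-- def count(list):
--     # Phase 1: partition all tokens into three flat lists by sentiment,
--     # remembering every token of a recognised sentence in 'seen'.
--     pos, neu, neg, seen = [], [], [], []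
--     for s, toks in list:
--         if s == 'positive':
--             pos += toks
--         elif s == 'neutral':
--             neu += toks
--         elif s == 'negative':
--             neg += toks
--         else:
--             continue
--         seen += toks
--     # Phase 2: assemble the result in first-occurrence order.
--     return {t: [pos.count(t), neu.count(t), neg.count(t)] for t in dict.fromkeys(seen)}
-- ===== Notes on version B (the rewrite author's own statement) =====
-- stated objective: alternative
-- what changed: Replaces A's incremental dict of mutable [pos,neu,neg] triples by a two-phase algorithm: one pass partitions all tokens into three flat per-sentiment lists (plus a 'seen' list), then the result dict is assembled in first-occurrence order by counting each token in the three lists.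
import Mathlib
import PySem

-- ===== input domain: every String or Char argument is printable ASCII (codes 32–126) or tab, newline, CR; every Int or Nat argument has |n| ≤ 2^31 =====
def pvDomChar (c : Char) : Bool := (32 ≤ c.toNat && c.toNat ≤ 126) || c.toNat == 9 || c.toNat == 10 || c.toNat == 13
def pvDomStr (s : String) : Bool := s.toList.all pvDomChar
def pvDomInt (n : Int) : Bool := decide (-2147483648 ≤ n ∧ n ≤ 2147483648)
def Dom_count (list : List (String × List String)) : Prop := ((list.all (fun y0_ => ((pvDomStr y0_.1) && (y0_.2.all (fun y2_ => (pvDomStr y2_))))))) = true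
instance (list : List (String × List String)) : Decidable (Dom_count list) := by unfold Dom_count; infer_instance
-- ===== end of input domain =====

-- B replaces A's incremental dict of [pos,neu,neg] triples by a two-phase partition
-- (flatten tokens into three per-sentiment lists, then assemble the dict in
-- first-occurrence order by counting); objective: alternative.

-- ===== PORT A =====
def count (list : List (String × List String)) : List (String × List Int) :=
  let a : Int := list.length
  let d : PySem.Dict String (List Int) :=
    (PySem.List.pyRange 0 a 1).foldl (fun count i =>
      let li := PySem.List.pyGetD list i ("", ([] : List String))
      let b : Int := li.2.length
      let count :=
        if li.1 = "positive" then
          (PySem.List.pyRange 0 b 1).foldl (fun cnt j =>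
            let t := PySem.List.pyGetD li.2 j ""
            if cnt.contains t = false then cnt.insert t [1, 0, 0]
            else cnt.modify t [0, 0, 0] (fun v =>
              PySem.List.pySetD v 0 (PySem.List.pyGetD v 0 0 + 1))) count
        else count
      let count :=
        if li.1 = "neutral" then
          (PySem.List.pyRange 0 b 1).foldl (fun cnt j =>
            let t := PySem.List.pyGetD li.2 j ""
            if cnt.contains t = false then cnt.insert t [0, 1, 0]
            else cnt.modify t [0, 0, 0] (fun v =>
              PySem.List.pySetD v 1 (PySem.List.pyGetD v 1 0 + 1))) count
        else count
      let count :=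
        if li.1 = "negative" then
          (PySem.List.pyRange 0 b 1).foldl (fun cnt j =>
            let t := PySem.List.pyGetD li.2 j ""
            if cnt.contains t = false then cnt.insert t [0, 0, 1]
            else cnt.modify t [0, 0, 0] (fun v =>
              PySem.List.pySetD v 2 (PySem.List.pyGetD v 2 0 + 1))) count
        else count
      count) PySem.Dict.empty
  d.items

-- ===== PORT B =====
def count_alt (list : List (String × List String)) : List (String × List Int) :=
  let st := list.foldl
    (fun (st : List String × List String × List String × List String) p =>
      if p.1 = "positive" then (st.1 ++ p.2, st.2.1, st.2.2.1, st.2.2.2 ++ p.2)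
      else if p.1 = "neutral" then (st.1, st.2.1 ++ p.2, st.2.2.1, st.2.2.2 ++ p.2)
      else if p.1 = "negative" then (st.1, st.2.1, st.2.2.1 ++ p.2, st.2.2.2 ++ p.2)
      else st)
    ([], [], [], [])
  (PySem.List.dedup st.2.2.2).map (fun t =>
    (t, ([(st.1.count t : Int), (st.2.1.count t : Int), (st.2.2.1.count t : Int)] : List Int)))

-- ===== PRECONDITION & SPEC =====
def Spec_count (list : List (String × List String)) (out : List (String × List Int)) : Prop := out = count_alt list
instance (list : List (String × List String)) (out : List (String × List Int)) : Decidable (Spec_count list out) := by unfold Spec_count; infer_instance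

-- ===== CLAIM (what is proved, stated in full; the proofs are below) =====
def Claim_equal_count : Prop := ∀ (list : List (String × List String)), Dom_count list → Spec_count list (count list)

-- ===== LEMMAS AND PROOFS =====

-- value stored for token t after counting pos/neu/neg
def pvVal (pos neu neg : List String) (t : String) : List Int :=
  [(pos.count t : Int), (neu.count t : Int), (neg.count t : Int)]

-- loop invariant relating A's dict to B's four flat lists
def pvInv (c : PySem.Dict String (List Int)) (pos neu neg seen : List String) : Prop :=
  c.items = (PySem.List.dedup seen).map (fun t => (t, pvVal pos neu neg t)) ∧
    pos ⊆ seen ∧ neu ⊆ seen ∧ neg ⊆ seen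

theorem pvTokenStep (c : PySem.Dict String (List Int)) (S : List String)
    (val : String → List Int) (bump : List Int → List Int) (init : List Int) (t : String)
    (hS : S.Nodup) (hd : c.items = S.map fun u => (u, val u))
    (hinit : init = bump [0, 0, 0]) (h0 : t ∉ S → val t = [0, 0, 0]) :
    (if c.contains t = false then c.insert t init
     else c.modify t [0, 0, 0] bump).items
      = (PySem.Set.add S t).map (fun u => (u, if u = t then bump (val u) else val u)) := by
  have hkeys : c.keys = S := by
    simp [PySem.Dict.keys, hd, List.map_map, Function.comp_def]
  have hcont : c.contains t = decide (t ∈ S) := by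
    rw [PySem.Dict.contains_eq_decide_mem_keys, hkeys]
  by_cases ht : t ∈ S
  · -- modify branch
    have hcont' : c.contains t = true := by simp [hcont, ht]
    rw [if_neg (by simp [hcont']), PySem.Set.add_of_mem ht]
    have hgd : c.getD t [0,0,0] = val t := by
      apply PySem.Dict.getD_of_mem_items
      · rw [hd]; exact List.mem_map_of_mem ht
      · rw [hkeys]; exact hS
    have : c.modify t [0,0,0] bump = c.insert t (bump (val t)) := by
      simp [PySem.Dict.modify, hgd]
    rw [this, PySem.Dict.items_insert_of_contains _ _ hcont', hd, List.map_map]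
    apply List.map_congr_left
    intro u hu
    by_cases hut : u = t
    · subst hut; simp
    · simp [fun h : u = t => hut h]
  · have hcont' : c.contains t = false := by simp [hcont, ht]
    rw [if_pos hcont', PySem.Set.add_of_not_mem ht,
      PySem.Dict.items_insert_of_not_contains _ _ hcont', hd]
    rw [List.map_append]
    congr 1
    · apply List.map_congr_left
      intro u hu
      have : u ≠ t := fun h => ht (h ▸ hu)
      simp [this]
    · simp [hinit, h0 ht]

theorem pvLoopPos (ts : List String) (c : PySem.Dict String (List Int))
    (pos neu neg seen : List String) (h : pvInv c pos neu neg seen) :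
    pvInv (ts.foldl (fun cnt t =>
        if cnt.contains t = false then cnt.insert t [1, 0, 0]
        else cnt.modify t [0, 0, 0] (fun v =>
          PySem.List.pySetD v 0 (PySem.List.pyGetD v 0 0 + 1))) c)
      (pos ++ ts) neu neg (seen ++ ts) := by
  induction ts generalizing c pos seen with
  | nil => simpa using h
  | cons t rest ih =>
    obtain ⟨hd, hp, hn, hg⟩ := h
    have step : pvInv (if c.contains t = false then c.insert t [1, 0, 0]
        else c.modify t [0, 0, 0] (fun v =>
          PySem.List.pySetD v 0 (PySem.List.pyGetD v 0 0 + 1)))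
        (pos ++ [t]) neu neg (seen ++ [t]) := by
      refine ⟨?_, ?_, ?_, ?_⟩
      · rw [pvTokenStep c (PySem.List.dedup seen) (pvVal pos neu neg)
          (fun v => PySem.List.pySetD v 0 (PySem.List.pyGetD v 0 0 + 1)) [1,0,0] t
          (by simp) hd (by decide)
          (fun hts => by
            have hts' : t ∉ seen := by simpa [PySem.List.mem_dedup] using hts
            simp [pvVal, List.count_eq_zero.mpr (fun hc => hts' (hp hc)),
              List.count_eq_zero.mpr (fun hc => hts' (hn hc)),
              List.count_eq_zero.mpr (fun hc => hts' (hg hc))])]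
        have hdedup : PySem.List.dedup (seen ++ [t]) = PySem.Set.add (PySem.List.dedup seen) t := by
          simp [PySem.List.dedup_eq_ofList, PySem.Set.ofList_append_singleton]
        rw [hdedup]
        apply List.map_congr_left
        intro u hu
        by_cases hut : u = t
        · subst hut
          simp [pvVal, PySem.List.pySetD, PySem.List.pySet?, PySem.List.pyIdx?, PySem.List.pyGetD, List.count_append]
        · simp [hut, pvVal, List.count_append, Ne.symm hut]
      · exact List.append_subset.mpr ⟨hp.trans (List.subset_append_left _ _),
          List.subset_append_right _ _⟩
      · exact hn.trans (List.subset_append_left _ _)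
      · exact hg.trans (List.subset_append_left _ _)
    have hassoc1 : pos ++ t :: rest = (pos ++ [t]) ++ rest := by simp
    have hassoc2 : seen ++ t :: rest = (seen ++ [t]) ++ rest := by simp
    rw [List.foldl_cons, hassoc1, hassoc2]
    exact ih _ _ _ step

theorem pvLoopNeu (ts : List String) (c : PySem.Dict String (List Int))
    (pos neu neg seen : List String) (h : pvInv c pos neu neg seen) :
    pvInv (ts.foldl (fun cnt t =>
        if cnt.contains t = false then cnt.insert t [0, 1, 0]
        else cnt.modify t [0, 0, 0] (fun v =>
          PySem.List.pySetD v 1 (PySem.List.pyGetD v 1 0 + 1))) c)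
      pos (neu ++ ts) neg (seen ++ ts) := by
  induction ts generalizing c neu seen with
  | nil => simpa using h
  | cons t rest ih =>
    obtain ⟨hd, hp, hn, hg⟩ := h
    have step : pvInv (if c.contains t = false then c.insert t [0, 1, 0]
        else c.modify t [0, 0, 0] (fun v =>
          PySem.List.pySetD v 1 (PySem.List.pyGetD v 1 0 + 1)))
        pos (neu ++ [t]) neg (seen ++ [t]) := by
      refine ⟨?_, ?_, ?_, ?_⟩
      · rw [pvTokenStep c (PySem.List.dedup seen) (pvVal pos neu neg)
          (fun v => PySem.List.pySetD v 1 (PySem.List.pyGetD v 1 0 + 1)) [0,1,0] t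
          (by simp) hd (by decide)
          (fun hts => by
            have hts' : t ∉ seen := by simpa [PySem.List.mem_dedup] using hts
            simp [pvVal, List.count_eq_zero.mpr (fun hc => hts' (hp hc)),
              List.count_eq_zero.mpr (fun hc => hts' (hn hc)),
              List.count_eq_zero.mpr (fun hc => hts' (hg hc))])]
        have hdedup : PySem.List.dedup (seen ++ [t]) = PySem.Set.add (PySem.List.dedup seen) t := by
          simp [PySem.List.dedup_eq_ofList, PySem.Set.ofList_append_singleton]
        rw [hdedup]
        apply List.map_congr_left
        intro u hu
        by_cases hut : u = t
        · subst hut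
          simp [pvVal, PySem.List.pySetD, PySem.List.pySet?, PySem.List.pyIdx?, PySem.List.pyGetD, List.count_append]
        · simp [hut, pvVal, List.count_append, Ne.symm hut]
      · exact hp.trans (List.subset_append_left _ _)
      · exact List.append_subset.mpr ⟨hn.trans (List.subset_append_left _ _),
          List.subset_append_right _ _⟩
      · exact hg.trans (List.subset_append_left _ _)
    have hassoc1 : neu ++ t :: rest = (neu ++ [t]) ++ rest := by simp
    have hassoc2 : seen ++ t :: rest = (seen ++ [t]) ++ rest := by simp
    rw [List.foldl_cons, hassoc1, hassoc2]
    exact ih _ _ _ step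

theorem pvLoopNeg (ts : List String) (c : PySem.Dict String (List Int))
    (pos neu neg seen : List String) (h : pvInv c pos neu neg seen) :
    pvInv (ts.foldl (fun cnt t =>
        if cnt.contains t = false then cnt.insert t [0, 0, 1]
        else cnt.modify t [0, 0, 0] (fun v =>
          PySem.List.pySetD v 2 (PySem.List.pyGetD v 2 0 + 1))) c)
      pos neu (neg ++ ts) (seen ++ ts) := by
  induction ts generalizing c neg seen with
  | nil => simpa using h
  | cons t rest ih =>
    obtain ⟨hd, hp, hn, hg⟩ := h
    have step : pvInv (if c.contains t = false then c.insert t [0, 0, 1]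
        else c.modify t [0, 0, 0] (fun v =>
          PySem.List.pySetD v 2 (PySem.List.pyGetD v 2 0 + 1)))
        pos neu (neg ++ [t]) (seen ++ [t]) := by
      refine ⟨?_, ?_, ?_, ?_⟩
      · rw [pvTokenStep c (PySem.List.dedup seen) (pvVal pos neu neg)
          (fun v => PySem.List.pySetD v 2 (PySem.List.pyGetD v 2 0 + 1)) [0,0,1] t
          (by simp) hd (by decide)
          (fun hts => by
            have hts' : t ∉ seen := by simpa [PySem.List.mem_dedup] using hts
            simp [pvVal, List.count_eq_zero.mpr (fun hc => hts' (hp hc)),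
              List.count_eq_zero.mpr (fun hc => hts' (hn hc)),
              List.count_eq_zero.mpr (fun hc => hts' (hg hc))])]
        have hdedup : PySem.List.dedup (seen ++ [t]) = PySem.Set.add (PySem.List.dedup seen) t := by
          simp [PySem.List.dedup_eq_ofList, PySem.Set.ofList_append_singleton]
        rw [hdedup]
        apply List.map_congr_left
        intro u hu
        by_cases hut : u = t
        · subst hut
          simp [pvVal, PySem.List.pySetD, PySem.List.pySet?, PySem.List.pyIdx?, PySem.List.pyGetD, List.count_append]
        · simp [hut, pvVal, List.count_append, Ne.symm hut]
      · exact hp.trans (List.subset_append_left _ _)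
      · exact hn.trans (List.subset_append_left _ _)
      · exact List.append_subset.mpr ⟨hg.trans (List.subset_append_left _ _),
          List.subset_append_right _ _⟩
    have hassoc1 : neg ++ t :: rest = (neg ++ [t]) ++ rest := by simp
    have hassoc2 : seen ++ t :: rest = (seen ++ [t]) ++ rest := by simp
    rw [List.foldl_cons, hassoc1, hassoc2]
    exact ih _ _ _ step

-- A's loop body as a function of the current dict and one (sentiment, tokens) pair
def pvRangeStep (count : PySem.Dict String (List Int)) (li : String × List String) :
    PySem.Dict String (List Int) :=
  let b : Int := li.2.length
  let count :=
    if li.1 = "positive" then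
      (PySem.List.pyRange 0 b 1).foldl (fun cnt j =>
        let t := PySem.List.pyGetD li.2 j ""
        if cnt.contains t = false then cnt.insert t [1, 0, 0]
        else cnt.modify t [0, 0, 0] (fun v =>
          PySem.List.pySetD v 0 (PySem.List.pyGetD v 0 0 + 1))) count
    else count
  let count :=
    if li.1 = "neutral" then
      (PySem.List.pyRange 0 b 1).foldl (fun cnt j =>
        let t := PySem.List.pyGetD li.2 j ""
        if cnt.contains t = false then cnt.insert t [0, 1, 0]
        else cnt.modify t [0, 0, 0] (fun v =>
          PySem.List.pySetD v 1 (PySem.List.pyGetD v 1 0 + 1))) count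
    else count
  let count :=
    if li.1 = "negative" then
      (PySem.List.pyRange 0 b 1).foldl (fun cnt j =>
        let t := PySem.List.pyGetD li.2 j ""
        if cnt.contains t = false then cnt.insert t [0, 0, 1]
        else cnt.modify t [0, 0, 0] (fun v =>
          PySem.List.pySetD v 2 (PySem.List.pyGetD v 2 0 + 1))) count
    else count
  count

-- A's index loop over range(len(list)) is the element loop with pvRangeStep
theorem pvCountEq (l : List (String × List String)) :
    count l = (l.foldl pvRangeStep PySem.Dict.empty).items := by
  unfold count
  exact congrArg PySem.Dict.items
    (PySem.List.foldl_pyRange_zero_pyGetD' l ("", ([] : List String)) pvRangeStep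
      PySem.Dict.empty)

-- B's quadruple accumulator step
def pvStepB (st : List String × List String × List String × List String)
    (p : String × List String) : List String × List String × List String × List String :=
  if p.1 = "positive" then (st.1 ++ p.2, st.2.1, st.2.2.1, st.2.2.2 ++ p.2)
  else if p.1 = "neutral" then (st.1, st.2.1 ++ p.2, st.2.2.1, st.2.2.2 ++ p.2)
  else if p.1 = "negative" then (st.1, st.2.1, st.2.2.1 ++ p.2, st.2.2.2 ++ p.2)
  else st

-- the whole traversal preserves the invariant
theorem pvMain (l : List (String × List String)) (c : PySem.Dict String (List Int))
    (pos neu neg seen : List String) (h : pvInv c pos neu neg seen) :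
    pvInv (l.foldl pvRangeStep c)
      (l.foldl pvStepB (pos, neu, neg, seen)).1
      (l.foldl pvStepB (pos, neu, neg, seen)).2.1
      (l.foldl pvStepB (pos, neu, neg, seen)).2.2.1
      (l.foldl pvStepB (pos, neu, neg, seen)).2.2.2 := by
  induction l generalizing c pos neu neg seen with
  | nil => simpa using h
  | cons p rest ih =>
    simp only [List.foldl_cons, pvRangeStep, pvStepB]
    by_cases h1 : p.1 = "positive"
    · simp only [h1, String.reduceEq, reduceIte]
      have hb : (PySem.List.pyRange 0 (p.2.length : Int) 1).foldl (fun cnt j =>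
          if cnt.contains (PySem.List.pyGetD p.2 j "") = false then
            cnt.insert (PySem.List.pyGetD p.2 j "") [1, 0, 0]
          else cnt.modify (PySem.List.pyGetD p.2 j "") [0, 0, 0] (fun v =>
            PySem.List.pySetD v 0 (PySem.List.pyGetD v 0 0 + 1))) c
          = p.2.foldl (fun cnt t =>
            if cnt.contains t = false then cnt.insert t [1, 0, 0]
            else cnt.modify t [0, 0, 0] (fun v =>
              PySem.List.pySetD v 0 (PySem.List.pyGetD v 0 0 + 1))) c :=
        PySem.List.foldl_pyRange_zero_pyGetD' p.2 "" (fun cnt t =>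
          if cnt.contains t = false then cnt.insert t [1, 0, 0]
          else cnt.modify t [0, 0, 0] (fun v =>
            PySem.List.pySetD v 0 (PySem.List.pyGetD v 0 0 + 1))) c
      rw [hb]
      exact ih _ _ _ _ _ (pvLoopPos p.2 c pos neu neg seen h)
    · by_cases h2 : p.1 = "neutral"
      · simp only [h2, String.reduceEq, reduceIte]
        have hb : (PySem.List.pyRange 0 (p.2.length : Int) 1).foldl (fun cnt j =>
            if cnt.contains (PySem.List.pyGetD p.2 j "") = false then
              cnt.insert (PySem.List.pyGetD p.2 j "") [0, 1, 0]
            else cnt.modify (PySem.List.pyGetD p.2 j "") [0, 0, 0] (fun v =>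
              PySem.List.pySetD v 1 (PySem.List.pyGetD v 1 0 + 1))) c
            = p.2.foldl (fun cnt t =>
              if cnt.contains t = false then cnt.insert t [0, 1, 0]
              else cnt.modify t [0, 0, 0] (fun v =>
                PySem.List.pySetD v 1 (PySem.List.pyGetD v 1 0 + 1))) c :=
          PySem.List.foldl_pyRange_zero_pyGetD' p.2 "" (fun cnt t =>
            if cnt.contains t = false then cnt.insert t [0, 1, 0]
            else cnt.modify t [0, 0, 0] (fun v =>
              PySem.List.pySetD v 1 (PySem.List.pyGetD v 1 0 + 1))) c
        rw [hb]
        exact ih _ _ _ _ _ (pvLoopNeu p.2 c pos neu neg seen h)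
      · by_cases h3 : p.1 = "negative"
        · simp only [h3, String.reduceEq, reduceIte]
          have hb : (PySem.List.pyRange 0 (p.2.length : Int) 1).foldl (fun cnt j =>
              if cnt.contains (PySem.List.pyGetD p.2 j "") = false then
                cnt.insert (PySem.List.pyGetD p.2 j "") [0, 0, 1]
              else cnt.modify (PySem.List.pyGetD p.2 j "") [0, 0, 0] (fun v =>
                PySem.List.pySetD v 2 (PySem.List.pyGetD v 2 0 + 1))) c
              = p.2.foldl (fun cnt t =>
                if cnt.contains t = false then cnt.insert t [0, 0, 1]
                else cnt.modify t [0, 0, 0] (fun v =>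
                  PySem.List.pySetD v 2 (PySem.List.pyGetD v 2 0 + 1))) c :=
            PySem.List.foldl_pyRange_zero_pyGetD' p.2 "" (fun cnt t =>
              if cnt.contains t = false then cnt.insert t [0, 0, 1]
              else cnt.modify t [0, 0, 0] (fun v =>
                PySem.List.pySetD v 2 (PySem.List.pyGetD v 2 0 + 1))) c
          rw [hb]
          exact ih _ _ _ _ _ (pvLoopNeg p.2 c pos neu neg seen h)
        · simp only [h1, h2, h3, reduceIte]
          exact ih _ _ _ _ _ h

-- ===== VERDICT (by name: the statement is the Claim_ definition above) =====
theorem count_spec : Claim_equal_count := by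
  intro list _hdom
  unfold Spec_count
  rw [pvCountEq]
  have h := pvMain list PySem.Dict.empty [] [] [] []
    ⟨rfl, by simp, by simp, by simp⟩
  rw [h.1]
  rfl
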